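-- pv_equiv track=rewrite | github.com/omarchrayah/Projet-ACSD---probl-me-du-routard-20200428 | RoutardApprox.py | prefixe
-- ===== SOURCE A (Python) =====
-- def prefixe(T):
--     liste=[]
--     k=dict()
--     def recursive(x):
--         for i in T.keys(): #dans cette boucle for , on transforme le dico des peres que prim a retourné en une liste qui contient les sommets et leurs fils
--             if i in T.values():
--                 k[i]= [key for key, value in T.items() if value == i] #recupere les clés qui ont la meme valeur
--             else:
--                 k[i]=list()
--
--         if k[x]!='': # on verifie si le sommet a bien les fils
--             liste.insert(len(liste),x) #inserer le sommet à la fin de la liste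
--             for pos in range (0,len(k[x])):
--                 for j in (k[x][pos]): #on parcourit les fils suivant leurs positions
--                     recursive(j)
--         else : #sinon , si le sommet n'as pas de fils on ajoute jste le sommet à la fin de la liste
--             liste.insert(len(liste),x)
--         return liste
--     return recursive(list(T.keys())[0]) #on recupere  le sommet initial
-- ===== SOURCE B (Python) =====
-- def prefixe(T):
--     # invert the parent map once, then iterative preorder with an explicit stack
--     children = {}
--     for c, p in T.items():
--         children.setdefault(p, []).append(c)
--     out = []
--     stack = [next(iter(T))]
--     while stack:
--         x = stack.pop()
--         out.append(x)
--         stack.extend(reversed(children.get(x, [])))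
--     return out
-- ===== Notes on version B (the rewrite author's own statement) =====
-- stated objective: faster
-- what changed: B inverts the parent map once and then runs an ITERATIVE preorder with an explicit stack (pop a node, emit it, push its children reversed), instead of A's recursive traversal that rebuilds the complete child dictionary inside every recursive call and iterates over the characters of each child key.
-- outside the precondition, e.g. on prefixe({'r': 'z', 'ab': 'r', 'a': 'q', 'b': 'q'}): A returns ['r', 'a', 'b'], B returns ['r', 'ab']; on prefixe({'r': 'z', '': 'r'}): A returns ['r'], B returns ['r', '']
import Mathlib
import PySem

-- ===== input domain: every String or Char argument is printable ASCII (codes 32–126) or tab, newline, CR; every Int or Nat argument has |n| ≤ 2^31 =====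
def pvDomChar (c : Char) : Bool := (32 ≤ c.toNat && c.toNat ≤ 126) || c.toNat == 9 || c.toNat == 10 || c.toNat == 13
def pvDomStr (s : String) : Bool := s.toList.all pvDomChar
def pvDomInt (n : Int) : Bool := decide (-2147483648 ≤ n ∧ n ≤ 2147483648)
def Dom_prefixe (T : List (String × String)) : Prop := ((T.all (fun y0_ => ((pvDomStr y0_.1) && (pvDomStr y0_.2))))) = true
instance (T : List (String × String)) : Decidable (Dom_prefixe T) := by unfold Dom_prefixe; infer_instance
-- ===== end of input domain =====

-- ===== PORT A =====
-- B inverts the parent map once and runs an ITERATIVE preorder with an explicit stack,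
-- instead of A's recursion that rebuilds the whole child dictionary inside every call and
-- iterates over the characters of each child key; measured faster (asymptotic).

-- A's inner loop over T.keys(): k[i] = [key for key,value in T.items() if value == i] if i in T.values() else list()
def kA (T : List (String × String)) : PySem.Dict String (List String) :=
  (PySem.Dict.mk T).keys.foldl (fun k i =>
    if (PySem.Dict.mk T).values.contains i then
      k.insert i (((PySem.Dict.mk T).items.filter (fun kv => kv.2 == i)).map (fun kv => kv.1))
    else
      k.insert i ([] : List String)) PySem.Dict.empty

-- A's `recursive(x)`: it first rebuilds k (the loop above), then appends x and recurses.
-- `if k[x] != ''` is always True in Python (a list is never equal to a str), so only the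
-- then-branch is reachable and is ported.  Fuel models Python's recursion limit: fuel 0 is
-- only reached on cyclic parent maps, where Python raises RecursionError (outside Pre_).
-- A KeyError (k[x] with x not a key, reachable only via multi-char child keys, outside Pre_)
-- is modelled by `.getD []`.
def recA (T : List (String × String)) : Nat → List String → String → List String
  | 0, liste, _ => liste
  | n+1, liste, x =>
    let k := kA T
    let kx := (k.get? x).getD []
    let liste' := liste ++ [x]    -- liste.insert(len(liste), x)
    kx.foldl (fun acc child =>
      child.toList.foldl (fun acc2 j => recA T n acc2 (String.ofList [j])) acc) liste'

def prefixe (T : List (String × String)) : List String :=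
  match (PySem.Dict.mk T).keys with
  | [] => []          -- Python: IndexError on list(T.keys())[0] (outside Pre_)
  | r :: _ => recA T (T.length + 1) [] r

-- ===== PORT B =====
-- children.setdefault(p, []).append(c) over T.items()
def childrenB (T : List (String × String)) : PySem.Dict String (List String) :=
  (PySem.Dict.mk T).items.foldl (fun ch q => ch.modify q.2 [] (fun l => l ++ [q.1])) PySem.Dict.empty

-- the while loop `x = stack.pop(); out.append(x); stack.extend(reversed(children.get(x, [])))`.
-- The stack is kept TOP-FIRST (the reverse of the Python list): `pop()` takes the head, and
-- `extend(reversed(C))` puts C in front, its first element on top — exact LIFO behaviour.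
-- Fuel models the unbounded `while`: it is generous enough to be unreachable under Pre_
-- (proved below); Python B loops forever only on cyclic parent maps, outside Pre_.
def stackLoopB (ch : PySem.Dict String (List String)) : Nat → List String → List String → List String
  | 0, _, out => out
  | _+1, [], out => out
  | n+1, x :: st, out => stackLoopB ch n ((ch.getD x []) ++ st) (out ++ [x])

def prefixe_alt (T : List (String × String)) : List String :=
  match (PySem.Dict.mk T).keys with
  | [] => []          -- Python: next(iter(T)) raises StopIteration (outside Pre_)
  | _ :: _ => stackLoopB (childrenB T) ((T.length + 1) ^ (T.length + 2))
      [((PySem.Dict.mk T).keys).headD ""] []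

-- ===== PRECONDITION & SPEC =====
-- reachesRoot T r n x: following parent pointers from x reaches r within n lookups.
-- A node is visited by A's traversal exactly when its parent chain reaches the first key.
def reachesRoot (T : List (String × String)) (r : String) : Nat → String → Bool
  | 0, x => x == r
  | n+1, x => x == r || (match T.lookup x with
      | none => false
      | some p => reachesRoot T r n p)

-- Pre_ excludes exactly the inputs on which Python A does not return its normal value:
-- the empty dict (IndexError on list(T.keys())[0]); dicts whose first key lies on a parent
-- cycle (RecursionError); duplicated keys (impossible in a Python dict, so such a list does
-- not represent A's input); and strict descendants of the root whose key is not a single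
-- character: on those A iterates over the CHARACTERS of the child's name — usually a
-- KeyError, and when every character happens to be a key A returns a traversal of characters
-- instead of vertices, an artefact of its implementation that B does not reproduce.
def Pre_prefixe (T : List (String × String)) : Prop :=
  T ≠ [] ∧
  (T.map Prod.fst).Nodup ∧
  (∀ q ∈ T, q.1 ≠ (T.map Prod.fst).headD "" →
      reachesRoot T ((T.map Prod.fst).headD "") T.length q.1 = true → q.1.toList.length = 1) ∧
  ((T.lookup ((T.map Prod.fst).headD "")).map
      (reachesRoot T ((T.map Prod.fst).headD "") T.length)).getD false = false

instance (T : List (String × String)) : Decidable (Pre_prefixe T) := by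
  unfold Pre_prefixe; infer_instance

def pvWitness_prefixe : (List (String × String)) := [("a", "z"), ("b", "a"), ("c", "a")]

def Spec_prefixe (T : List (String × String)) (out : List String) : Prop := out = prefixe_alt T
instance (T : List (String × String)) (out : List String) : Decidable (Spec_prefixe T out) := by
  unfold Spec_prefixe; infer_instance

-- ===== CLAIM (what is proved, stated in full; the proofs are below) =====
def Claim_equal_prefixe : Prop :=
  ∀ (T : List (String × String)), Dom_prefixe T → Pre_prefixe T → Spec_prefixe T (prefixe T)

-- ===== LEMMAS AND PROOFS =====

-- recursive preorder with fuel: the common reference both ports are reduced to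
def preB (ch : PySem.Dict String (List String)) : Nat → String → List String
  | 0, _ => []
  | n+1, x => (ch.getD x []).foldl (fun out c => out ++ preB ch n c) [x]

-- children of x, as both programs compute them: the keys whose value is x, in key order
def childList (T : List (String × String)) (x : String) : List String :=
  (T.filter (fun q => q.2 == x)).map (fun q => q.1)

lemma preB_succ (ch : PySem.Dict String (List String)) (n : Nat) (x : String) :
    preB ch (n+1) x = x :: (ch.getD x []).flatMap (preB ch n) := by
  show (ch.getD x []).foldl (fun out c => out ++ preB ch n c) [x] = _
  rw [PySem.List.foldl_append_eq_flatMap]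
  rfl

-- reachesRoot is monotone in its fuel
lemma reachesRoot_mono (T : List (String × String)) (r : String) :
    ∀ (m m' : Nat) (x : String), m ≤ m' → reachesRoot T r m x = true → reachesRoot T r m' x = true := by
  intro m
  induction m with
  | zero =>
    intro m' x _ h
    have hx : (x == r) = true := h
    cases m' with
    | zero => exact hx
    | succ m' => simp [reachesRoot, hx]
  | succ m ih =>
    intro m' x hle h
    cases m' with
    | zero => omega
    | succ m' =>
      simp only [reachesRoot] at h ⊢
      rcases Bool.or_eq_true_iff.mp h with hx | hrec
      · simp [hx]
      · cases hl : T.lookup x with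
        | none => rw [hl] at hrec; simp at hrec
        | some p =>
          rw [hl] at hrec
          simp only [Bool.or_eq_true_iff]
          exact Or.inr (by simpa using ih m' p (by omega) hrec)

-- with distinct keys, membership of a pair determines the lookup
lemma lookup_of_mem_nodup {T : List (String × String)} {c x : String}
    (hnd : (T.map Prod.fst).Nodup) (h : (c, x) ∈ T) : T.lookup c = some x := by
  induction T with
  | nil => cases h
  | cons q rest ih =>
    obtain ⟨k, v⟩ := q
    simp only [List.map_cons, List.nodup_cons] at hnd
    rcases List.mem_cons.mp h with hq | hm
    · rw [Prod.mk.injEq] at hq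
      simp [List.lookup, hq.1, hq.2]
    · have hne : (c == k) = false := by
        apply beq_eq_false_iff_ne.mpr
        intro hqc
        exact hnd.1 (hqc ▸ List.mem_map.mpr ⟨(c, x), hm, rfl⟩ : k ∈ List.map Prod.fst rest)
      simp [List.lookup, hne, ih hnd.2 hm]

-- a fold of inserts whose value depends only on the key: lookup is pointwise
lemma get?_foldl_insert_fun {ν : Type} (g : String → ν) :
    ∀ (l : List String) (d : PySem.Dict String ν) (x : String),
      (l.foldl (fun k i => k.insert i (g i)) d).get? x
        = if x ∈ l then some (g x) else d.get? x := by
  intro l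
  induction l with
  | nil => intro d x; simp
  | cons a l ih =>
    intro d x
    simp only [List.foldl_cons, ih, List.mem_cons]
    by_cases hx : x ∈ l
    · simp [hx]
    · by_cases hxa : x = a
      · subst hxa; simp [hx]
      · simp [hx, hxa, PySem.Dict.get?_insert]

-- A's per-call dictionary k, looked up at a key x, is exactly childList T x
lemma kA_get (T : List (String × String)) (x : String) (hx : x ∈ T.map Prod.fst) :
    ((kA T).get? x).getD [] = childList T x := by
  unfold kA
  have hfun : (fun (k : PySem.Dict String (List String)) (i : String) =>
      if (PySem.Dict.mk T).values.contains i then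
        k.insert i (((PySem.Dict.mk T).items.filter (fun kv => kv.2 == i)).map (fun kv => kv.1))
      else k.insert i ([] : List String))
      = fun k i => k.insert i (if (PySem.Dict.mk T).values.contains i then
          ((PySem.Dict.mk T).items.filter (fun kv => kv.2 == i)).map (fun kv => kv.1) else []) := by
    funext k i
    exact (apply_ite (k.insert i) _ _ _).symm
  rw [hfun, get?_foldl_insert_fun]
  have hmem : x ∈ (PySem.Dict.mk T).keys := by
    simpa [PySem.Dict.keys_mk] using hx
  rw [if_pos hmem, Option.getD_some]
  by_cases hv : (PySem.Dict.mk T).values.contains x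
  · rw [if_pos hv]; rfl
  · rw [if_neg hv]
    -- x is no one's parent: the filter in childList is empty as well
    have hnv : ∀ q ∈ T, (q.2 == x) = false := by
      intro q hq
      apply beq_eq_false_iff_ne.mpr
      intro hqx
      exact hv (List.elem_eq_true_of_mem (by
        rw [PySem.Dict.values_mk]
        exact List.mem_map.mpr ⟨q, hq, hqx⟩))
    have hfil : T.filter (fun q => q.2 == x) = [] := by
      rw [List.filter_eq_nil_iff]; intro q hq; simp [hnv q hq]
    simp [childList, hfil]

-- B's children map, looked up anywhere, is childList
lemma getD_childfold :
    ∀ (l : List (String × String)) (d : PySem.Dict String (List String)) (x : String),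
      (l.foldl (fun ch q => ch.modify q.2 [] (fun v => v ++ [q.1])) d).getD x []
        = d.getD x [] ++ (l.filter (fun q => q.2 == x)).map (fun q => q.1) := by
  intro l
  induction l with
  | nil => intro d x; simp
  | cons q l ih =>
    intro d x
    simp only [List.foldl_cons, ih, PySem.Dict.getD_modify]
    by_cases hx : x = q.2
    · subst hx; simp
    · have : (q.2 == x) = false := by simpa using fun h => hx h.symm
      simp [hx, this]

lemma childrenB_getD (T : List (String × String)) (x : String) :
    (childrenB T).getD x [] = childList T x := by
  unfold childrenB childList
  rw [getD_childfold]
  simp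

-- members of childList are the keys whose stored parent is x
lemma childList_mem {T : List (String × String)} {x c : String} (hc : c ∈ childList T x) :
    ∃ q ∈ T, q.1 = c ∧ q.2 = x := by
  unfold childList at hc
  obtain ⟨q, hq, rfl⟩ := List.mem_map.mp hc
  have := List.mem_filter.mp hq
  exact ⟨q, this.1, rfl, eq_of_beq this.2⟩

-- A's recursion with its per-call map and character iteration produces exactly the
-- recursive preorder preB appended to the accumulator (same fuel, tied to chain length).
lemma recA_eq_preB (T : List (String × String)) (r : String)
    (hnd : (T.map Prod.fst).Nodup)
    (hlen : ∀ q ∈ T, q.1 ≠ r → reachesRoot T r T.length q.1 = true → q.1.toList.length = 1)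
    (hnc : ∀ p, T.lookup r = some p → reachesRoot T r T.length p = false) :
    ∀ (n : Nat), n ≤ T.length + 1 → ∀ (acc : List String) (x : String), x ∈ T.map Prod.fst →
      reachesRoot T r (T.length + 1 - n) x = true →
      recA T n acc x = acc ++ preB (childrenB T) n x := by
  intro n
  induction n with
  | zero => intro _ acc x _ _; simp [recA, preB]
  | succ n ih =>
    intro hfuel acc x hx hreach
    have hkx : ((kA T).get? x).getD [] = childList T x := kA_get T x hx
    have hch : (childrenB T).getD x [] = childList T x := childrenB_getD T x
    show ((((kA T).get? x).getD []).foldl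
        (fun acc child => child.toList.foldl
          (fun acc2 j => recA T n acc2 (String.ofList [j])) acc) (acc ++ [x]))
      = acc ++ preB (childrenB T) (n+1) x
    rw [hkx]
    have hstep : ∀ (a : List String), ∀ c ∈ childList T x,
        c.toList.foldl (fun a2 j => recA T n a2 (String.ofList [j])) a
          = a ++ preB (childrenB T) n c := by
      intro a c hc
      obtain ⟨q, hq, rfl, hq2⟩ := childList_mem hc
      have hkey : q.1 ∈ T.map Prod.fst := List.mem_map.mpr ⟨q, hq, rfl⟩
      -- the child's parent chain: one lookup to x, then x's chain
      have hcr : reachesRoot T r (T.length + 1 - n) q.1 = true := by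
        have hlk : T.lookup q.1 = some x := by
          have hmem' : (q.1, x) ∈ T := by
            rw [← hq2]; simpa using hq
          exact lookup_of_mem_nodup hnd hmem'
        cases hn : T.length + 1 - n with
        | zero => omega
        | succ m =>
          have hx' : reachesRoot T r m x = true := by
            have hle : T.length + 1 - (n+1) ≤ m := by omega
            exact reachesRoot_mono T r _ m x hle hreach
          show reachesRoot T r (m+1) q.1 = true
          simp only [reachesRoot, hlk, Bool.or_eq_true_iff]
          exact Or.inr hx'
      cases n with
      | zero =>
        -- with no fuel left both recursions return their accumulator unchanged
        have hA : ∀ (l : List Char) (a2 : List String),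
            l.foldl (fun a2 j => recA T 0 a2 (String.ofList [j])) a2 = a2 := by
          intro l a2
          simp [recA]
        simp [hA, preB]
      | succ n' =>
        -- enough fuel: the child is a strict descendant of r, hence a single character
        have hcne : q.1 ≠ r := by
          intro hqr
          -- q.1 = r would put r on a cycle: r's parent is x and x's chain reaches r
          have hlkr : T.lookup r = some x := by
            have hmem' : (r, x) ∈ T := by
              rw [← hqr, ← hq2]; simpa using hq
            exact lookup_of_mem_nodup hnd hmem'
          have hxr : reachesRoot T r T.length x = true :=
            reachesRoot_mono T r _ _ x (by omega) hreach
          rw [hnc x hlkr] at hxr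
          cases hxr
        have h1 : q.1.toList.length = 1 :=
          hlen q hq hcne (reachesRoot_mono T r _ _ q.1 (by omega) hcr)
        obtain ⟨j, hj⟩ : ∃ j, q.1.toList = [j] := by
          cases h : q.1.toList with
          | nil => simp [h] at h1
          | cons j t => cases t with
            | nil => exact ⟨j, rfl⟩
            | cons _ _ => simp [h] at h1
        have hmk : String.ofList [j] = q.1 := by rw [← hj]; exact String.ofList_toList
        rw [hj]
        simp only [List.foldl_cons, List.foldl_nil, hmk]
        exact ih (by omega) a q.1 hkey hcr
    rw [PySem.List.foldl_congr_mem _ _ (fun a c => a ++ preB (childrenB T) n c) _ hstep,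
        PySem.List.foldl_append_eq_flatMap]
    show _ = acc ++ preB (childrenB T) (n+1) x
    rw [preB_succ, hch]
    simp

-- ===== the B side: the stack loop drains to the recursive preorder =====

-- preB output never shrinks with fuel
lemma preB_len_mono (ch : PySem.Dict String (List String)) :
    ∀ (n : Nat) (x : String), (preB ch n x).length ≤ (preB ch (n+1) x).length := by
  intro n
  induction n with
  | zero => intro x; simp [preB]
  | succ n ih =>
    intro x
    rw [preB_succ, preB_succ]
    simp only [List.length_cons, List.length_flatMap, Nat.add_le_add_iff_right]
    exact List.sum_le_sum (fun c _ => ih c)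

-- equal flattenings with componentwise shorter pieces split componentwise
lemma flat_split (f g : String → List String) :
    ∀ (C : List String), (∀ c ∈ C, (f c).length ≤ (g c).length) →
      C.flatMap f = C.flatMap g → ∀ c ∈ C, f c = g c := by
  intro C
  induction C with
  | nil => intro _ _ c hc; cases hc
  | cons a C ih =>
    intro hle heq c hc
    simp only [List.flatMap_cons] at heq
    have hlen : (f a).length = (g a).length := by
      have h1 : (f a).length ≤ (g a).length := hle a (List.mem_cons_self ..)
      have h2 : (C.flatMap f).length ≤ (C.flatMap g).length := by
        simp only [List.length_flatMap]
        exact List.sum_le_sum (fun c hc => hle c (List.mem_cons_of_mem _ hc))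
      have htot : (f a).length + (C.flatMap f).length
          = (g a).length + (C.flatMap g).length := by
        have := congrArg List.length heq
        simpa using this
      omega
    obtain ⟨hfa, hrest⟩ := List.append_inj heq hlen
    rcases List.mem_cons.mp hc with rfl | hc'
    · exact hfa
    · exact ih (fun c hc => hle c (List.mem_cons_of_mem _ hc)) hrest c hc'

-- fuel-stability: preB ch (m+1) x = preB ch m x
def StabB (ch : PySem.Dict String (List String)) (m : Nat) (x : String) : Prop :=
  preB ch (m+1) x = preB ch m x

lemma stab_pos {ch : PySem.Dict String (List String)} {m : Nat} {x : String}
    (h : StabB ch m x) : 1 ≤ m := by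
  cases m with
  | zero =>
    exfalso
    have : preB ch 1 x = [] := h
    rw [preB_succ] at this
    cases this
  | succ m => omega

lemma stab_child {ch : PySem.Dict String (List String)} {m : Nat} {x : String}
    (h : StabB ch (m+1) x) : ∀ c ∈ ch.getD x [], StabB ch m c := by
  intro c hc
  have h' : (ch.getD x []).flatMap (preB ch m) = (ch.getD x []).flatMap (preB ch (m+1)) := by
    have := h
    unfold StabB at this
    rw [preB_succ, preB_succ] at this
    exact (List.cons_injective this).symm
  exact (flat_split (preB ch m) (preB ch (m+1)) _ (fun c _ => preB_len_mono ch m c) h' c hc).symm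

-- crude but sufficient size bound: the preorder of x has at most (N+1)^m elements
lemma preB_size (ch : PySem.Dict String (List String)) (N : Nat)
    (hb : ∀ x, (ch.getD x []).length ≤ N) :
    ∀ (m : Nat) (x : String), (preB ch m x).length ≤ (N+1) ^ m := by
  intro m
  induction m with
  | zero => intro x; simp [preB]
  | succ m ih =>
    intro x
    rw [preB_succ]
    simp only [List.length_cons, List.length_flatMap]
    have h1 : ((ch.getD x []).map (fun c => (preB ch m c).length)).sum
        ≤ ((ch.getD x []).map (fun _ => (N+1) ^ m)).sum :=
      List.sum_le_sum (fun c _ => ih c)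
    have h2 : ((ch.getD x []).map (fun _ => (N+1) ^ m)).sum = (ch.getD x []).length * (N+1) ^ m := by
      rw [List.map_const', List.sum_replicate, smul_eq_mul]
    have h3 : (ch.getD x []).length * (N+1) ^ m ≤ N * (N+1) ^ m :=
      Nat.mul_le_mul_right _ (hb x)
    have h4 : 1 ≤ (N+1) ^ m := Nat.one_le_pow _ _ (by omega)
    calc ((ch.getD x []).map (fun c => (preB ch m c).length)).sum + 1
        ≤ N * (N+1) ^ m + 1 := by omega
      _ ≤ (N+1) ^ (m+1) := by
          have h5 : (N+1) ^ (m+1) = N * (N+1) ^ m + (N+1) ^ m := by ring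
          omega

-- the drain lemma: with enough fuel the stack loop computes the concatenation of the
-- recursive preorders of the (ghost-fuelled, fuel-stable) stack entries
lemma drain (ch : PySem.Dict String (List String)) :
    ∀ (F : Nat) (gst : List (String × Nat)) (out : List String),
      (∀ p ∈ gst, StabB ch p.2 p.1) →
      (gst.map (fun p => (preB ch p.2 p.1).length)).sum ≤ F →
      stackLoopB ch F (gst.map Prod.fst) out
        = out ++ gst.flatMap (fun p => preB ch p.2 p.1) := by
  intro F
  induction F with
  | zero =>
    intro gst out hs hf
    cases gst with
    | nil => simp [stackLoopB]
    | cons p g =>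
      exfalso
      obtain ⟨x, m⟩ := p
      have h1 := stab_pos (hs _ (List.mem_cons_self ..))
      obtain ⟨k, rfl⟩ : ∃ k, m = k + 1 := ⟨m - 1, by omega⟩
      have hne : (preB ch (k+1) x).length ≥ 1 := by rw [preB_succ]; simp
      simp only [List.map_cons, List.sum_cons] at hf
      omega
  | succ n ih =>
    intro gst out hs hf
    cases gst with
    | nil => simp [stackLoopB]
    | cons p g =>
      obtain ⟨x, m⟩ := p
      have hsx : StabB ch m x := hs _ (List.mem_cons_self ..)
      obtain ⟨k, rfl⟩ : ∃ k, m = k + 1 := ⟨m - 1, by have := stab_pos hsx; omega⟩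
      show stackLoopB ch n (ch.getD x [] ++ g.map Prod.fst) (out ++ [x]) = _
      have hghost : ch.getD x [] ++ g.map Prod.fst
          = (((ch.getD x []).map (fun c => (c, k))) ++ g).map Prod.fst := by
        simp [Function.comp_def]
      rw [hghost, ih _ _ ?_ ?_]
      · simp only [List.flatMap_cons, List.flatMap_append, List.flatMap_map]
        rw [preB_succ]
        simp [List.append_assoc]
      · intro q hq
        rcases List.mem_append.mp hq with hq1 | hq2
        · obtain ⟨c, hc, rfl⟩ := List.mem_map.mp hq1
          exact stab_child hsx c hc
        · exact hs q (List.mem_cons_of_mem _ hq2)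
      · -- fuel accounting: the popped node paid one unit
        have hx : (preB ch (k+1) x).length
            = 1 + (((ch.getD x []).map (fun c => (c, k))).map
                (fun p => (preB ch p.2 p.1).length)).sum := by
          rw [preB_succ]
          simp only [List.length_cons, List.map_map, Function.comp_def, List.length_flatMap]
          omega
        simp only [List.map_cons, List.sum_cons, List.map_append, List.sum_append] at hf ⊢
        omega

-- ===== root stability: under Pre_ the reachable part of the map is a tree of depth ≤ N =====

-- UpChain T r anc x: anc is the strictly-ascending parent chain of x, ending at r
def UpChain (T : List (String × String)) (r : String) : List String → String → Prop
  | [], x => x = r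
  | p :: l, x => T.lookup x = some p ∧ UpChain T r l p

lemma up_reaches (T : List (String × String)) (r : String) :
    ∀ (anc : List String) (x : String), UpChain T r anc x →
      reachesRoot T r anc.length x = true := by
  intro anc
  induction anc with
  | nil => intro x hx; simpa [reachesRoot] using hx
  | cons p l ih =>
    intro x hx
    obtain ⟨hlk, hup⟩ := hx
    show reachesRoot T r (l.length + 1) x = true
    simp only [reachesRoot, hlk, Bool.or_eq_true_iff]
    exact Or.inr (ih p hup)

-- every chain element other than r has its parent in the chain
lemma up_elem (T : List (String × String)) (r : String) :
    ∀ (anc : List String) (x : String), UpChain T r anc x → ∀ c ∈ anc,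
      c = r ∨ ∃ p, T.lookup c = some p ∧ p ∈ anc := by
  intro anc
  induction anc with
  | nil => intro x _ c hc; cases hc
  | cons p l ih =>
    intro x hx c hc
    obtain ⟨hlk, hup⟩ := hx
    rcases List.mem_cons.mp hc with rfl | hc'
    · cases l with
      | nil => exact Or.inl hup
      | cons q l' =>
        exact Or.inr ⟨q, hup.1, List.mem_cons_of_mem _ (List.mem_cons_self ..)⟩
    · rcases ih p hup c hc' with h | ⟨p', hp1, hp2⟩
      · exact Or.inl h
      · exact Or.inr ⟨p', hp1, List.mem_cons_of_mem _ hp2⟩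

-- a nodup list of keys is no longer than the key list
lemma nodup_len_le {l keys : List String} (hnd : l.Nodup) (hsub : ∀ a ∈ l, a ∈ keys) :
    l.length ≤ keys.length := by
  classical
  calc l.length = l.toFinset.card := (List.toFinset_card_of_nodup hnd).symm
    _ ≤ keys.toFinset.card := Finset.card_le_card (by
        intro a ha
        exact List.mem_toFinset.mpr (hsub a (List.mem_toFinset.mp ha)))
    _ ≤ keys.length := keys.toFinset_card_le

-- the heart of the depth bound: along a nodup ancestor chain, stability holds with fuel
-- (N - |anc|) + 1; at the root (anc = []) this is StabB (N+1).
lemma stabMain (T : List (String × String)) (r : String)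
    (hnd : (T.map Prod.fst).Nodup)
    (hnc : ∀ p, T.lookup r = some p → reachesRoot T r T.length p = false) :
    ∀ (d : Nat) (x : String) (anc : List String),
      UpChain T r anc x → (x :: anc).Nodup → (∀ a ∈ x :: anc, a ∈ T.map Prod.fst) →
      d + anc.length = T.length → StabB (childrenB T) (d+1) x := by
  intro d
  induction d with
  | zero =>
    intro x anc _ hnod hsub hlen
    exfalso
    have := nodup_len_le hnod hsub
    simp only [List.length_cons, List.length_map] at this
    omega
  | succ e ih =>
    intro x anc hup hnod hsub hlen
    show preB (childrenB T) (e+3) x = preB (childrenB T) (e+2) x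
    rw [preB_succ, preB_succ]
    congr 1
    apply List.flatMap_congr  -- componentwise: each child is stable at fuel e+1
    intro c hc
    rw [childrenB_getD] at hc
    obtain ⟨q, hq, rfl, hq2⟩ := childList_mem hc
    have hlk : T.lookup q.1 = some x :=
      lookup_of_mem_nodup hnd (by rw [← hq2]; simpa using hq)
    have hkey : q.1 ∈ T.map Prod.fst := List.mem_map.mpr ⟨q, hq, rfl⟩
    have hxanc : x ∉ anc := (List.nodup_cons.mp hnod).1
    have hN : anc.length ≤ T.length := by omega
    -- c is not on the chain x :: anc
    have hnotin : q.1 ∉ x :: anc := by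
      intro hin
      rcases List.mem_cons.mp hin with hcx | hcanc
      · -- c = x : lookup x = some x
        rw [hcx] at hlk
        cases hanc : anc with
        | nil =>
          -- x = r and lookup r = some r, contradicting acyclicity at r
          have hxr : x = r := by rw [hanc] at hup; exact hup
          rw [hxr] at hlk
          have := hnc r hlk
          have hrr : reachesRoot T r T.length r = true := by
            cases hT : T.length with
            | zero => simp [reachesRoot]
            | succ k => simp [reachesRoot]
          rw [this] at hrr; cases hrr
        | cons p l =>
          rw [hanc] at hup
          have : x = p := by
            have h := hup.1
            rw [hlk] at h
            injection h
          exact hxanc (by rw [hanc, this]; exact List.mem_cons_self ..)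
      · -- c ∈ anc : its chain-parent is also x, forcing x ∈ anc
        rcases up_elem T r anc x hup q.1 hcanc with hcr | ⟨p, hp1, hp2⟩
        · -- c = r : lookup r = some x with x reaching r, contradicting acyclicity
          rw [hcr] at hlk
          have hfalse := hnc x hlk
          have htrue : reachesRoot T r T.length x = true :=
            reachesRoot_mono T r anc.length T.length x hN (up_reaches T r anc x hup)
          rw [hfalse] at htrue; cases htrue
        · rw [hlk] at hp1
          exact hxanc ((Option.some_injective _ hp1) ▸ hp2)
    exact ih q.1 (x :: anc) ⟨hlk, hup⟩ (List.nodup_cons.mpr ⟨hnotin, hnod⟩)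
      (by
        intro a ha
        rcases List.mem_cons.mp ha with rfl | ha'
        · exact hkey
        · exact hsub a ha')
      (by simp at hlen ⊢; omega)

-- ===== VERDICT (by name: the statement is the Claim_ definition above) =====
theorem prefixe_spec : Claim_equal_prefixe := by
  intro T _ hpre
  obtain ⟨hne, hnd, hlen, hnc⟩ := hpre
  unfold Spec_prefixe prefixe prefixe_alt
  cases hT : T with
  | nil => exact absurd hT hne
  | cons q rest =>
    obtain ⟨r, p⟩ := q
    subst hT
    have hhead : ((((r, p) :: rest).map Prod.fst).headD "") = r := rfl
    rw [hhead] at hlen hnc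
    have hkeysmk : (PySem.Dict.mk ((r, p) :: rest)).keys = r :: rest.map Prod.fst := by
      simp [PySem.Dict.keys_mk]
    rw [hkeysmk]
    have hnc' : ∀ x, ((r, p) :: rest).lookup r = some x →
        reachesRoot ((r, p) :: rest) r ((r, p) :: rest).length x = false := by
      intro x hlk
      cases hb : reachesRoot ((r, p) :: rest) r ((r, p) :: rest).length x with
      | false => rfl
      | true =>
        rw [hlk] at hnc
        simp only [Option.map_some, Option.getD_some] at hnc
        rw [hb] at hnc
        cases hnc
    have hr : r ∈ ((r, p) :: rest).map Prod.fst := by simp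
    set T' := (r, p) :: rest with hT'
    set N := T'.length with hNdef
    -- A's side: recA with fuel N+1 is the recursive preorder preB with fuel N+1
    have hreach0 : reachesRoot T' r (N + 1 - (N + 1)) r = true := by
      simp [reachesRoot]
    have hA : recA T' (N + 1) [] r = [] ++ preB (childrenB T') (N+1) r :=
      recA_eq_preB T' r hnd hlen hnc' (N + 1) (le_refl _) [] r hr hreach0
    -- B's side: the stack loop drains to the same preorder
    have hstab : StabB (childrenB T') (N+1) r := by
      have := stabMain T' r hnd hnc' N r [] rfl (by simp) (by
        intro a ha
        simp only [List.mem_singleton] at ha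
        rw [ha]; exact hr) (by simpa using hNdef)
      exact this
    have hbound : ∀ x, ((childrenB T').getD x []).length ≤ N := by
      intro x
      rw [childrenB_getD]
      calc ((T'.filter (fun q => q.2 == x)).map (fun q => q.1)).length
          = (T'.filter (fun q => q.2 == x)).length := List.length_map ..
        _ ≤ T'.length := List.length_filter_le ..
    have hsize : (preB (childrenB T') (N+1) r).length ≤ (N+1) ^ (N+1) :=
      preB_size (childrenB T') N hbound (N+1) r
    have hfuel : ((([(r, N+1)] : List (String × Nat)).map
        (fun p => (preB (childrenB T') p.2 p.1).length)).sum) ≤ (N+1) ^ (N+2) := by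
      simp only [List.map_cons, List.map_nil, List.sum_cons, List.sum_nil, Nat.add_zero]
      calc (preB (childrenB T') (N+1) r).length ≤ (N+1) ^ (N+1) := hsize
        _ ≤ (N+1) ^ (N+2) := Nat.pow_le_pow_right (by omega) (by omega)
    have hB := drain (childrenB T') ((N+1) ^ (N+2)) [(r, N+1)] []
      (by intro p hp; simp only [List.mem_singleton] at hp; rw [hp]; exact hstab) hfuel
    simp only [List.map_cons, List.map_nil, List.flatMap_cons, List.flatMap_nil,
      List.nil_append, List.append_nil] at hB
    show recA T' (N + 1) [] r
      = stackLoopB (childrenB T') ((N + 1) ^ (N + 2)) [((r :: rest.map Prod.fst).headD "")] []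
    have hhd : ((r :: rest.map Prod.fst).headD "") = r := rfl
    rw [hhd, hA, hB]
    simp
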